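-- pv_equiv track=rewrite | github.com/cooperxxjohn-svg/xboq | src/bidagent/agent.py | _follow_up_suggestions
-- ===== SOURCE A (Python) =====
-- from typing import Any, Dict, List, Optional
--
-- def _follow_up_suggestions(question: str, synthesis: Any) -> List[str]:
--     q_lower = question.lower()
--
--     if any(kw in q_lower for kw in ["blocker", "critical", "ready"]):
--         return [
--             "What RFIs should I send first?",
--             "What is the recommended contingency?",
--             "Which trades are highest risk?",
--         ]
--     if any(kw in q_lower for kw in ["structural", "concrete", "rcc", "steel"]):
--         return [
--             "What is the estimated structural cost?",
--             "Are there missing structural drawings?",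
--             "What concrete grades are specified?",
--         ]
--     if any(kw in q_lower for kw in ["mep", "electrical", "plumbing", "hvac"]):
--         return [
--             "How complete is the MEP specification?",
--             "Are MEP BOQ items extracted?",
--             "What specialist subcontractors are needed?",
--         ]
--     if any(kw in q_lower for kw in ["cost", "rate", "price", "estimate"]):
--         return [
--             "What is the recommended contingency?",
--             "Which trades have unrated items?",
--             "What is the cost per sqm?",
--         ]
--     if any(kw in q_lower for kw in ["rfi", "clarification", "question"]):
--         return [
--             "What are the critical blockers?",
--             "Which gaps have the highest cost impact?",
--             "Summarise the door and window schedule",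
--         ]
--
--     # Generic follow-ups
--     return [
--         "What are the critical blockers?",
--         "What is the recommended contingency?",
--         "What RFIs should I send first?",
--     ]
-- ===== SOURCE B (Python) =====
-- from typing import Any, List
--
-- # Flat keyword -> priority tier map; tier index selects the suggestion list.
-- _KEYWORD_TIER = {
--     "blocker": 0, "critical": 0, "ready": 0,
--     "structural": 1, "concrete": 1, "rcc": 1, "steel": 1,
--     "mep": 2, "electrical": 2, "plumbing": 2, "hvac": 2,
--     "cost": 3, "rate": 3, "price": 3, "estimate": 3,
--     "rfi": 4, "clarification": 4, "question": 4,
-- }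
--
-- _TIER_SUGGESTIONS = [
--     ["What RFIs should I send first?",
--      "What is the recommended contingency?",
--      "Which trades are highest risk?"],
--     ["What is the estimated structural cost?",
--      "Are there missing structural drawings?",
--      "What concrete grades are specified?"],
--     ["How complete is the MEP specification?",
--      "Are MEP BOQ items extracted?",
--      "What specialist subcontractors are needed?"],
--     ["What is the recommended contingency?",
--      "Which trades have unrated items?",
--      "What is the cost per sqm?"],
--     ["What are the critical blockers?",
--      "Which gaps have the highest cost impact?",
--      "Summarise the door and window schedule"],
--     ["What are the critical blockers?",
--      "What is the recommended contingency?",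
--      "What RFIs should I send first?"],
-- ]
--
-- def _follow_up_suggestions(question: str, synthesis: Any) -> List[str]:
--     q = question.lower()
--     tier = min((t for kw, t in _KEYWORD_TIER.items() if kw in q),
--                default=len(_TIER_SUGGESTIONS) - 1)
--     return _TIER_SUGGESTIONS[tier]
-- ===== Notes on version B (the rewrite author's own statement) =====
-- stated objective: alternative
-- what changed: Replaces the first-match if/elif branch chain by a flat keyword-to-priority-tier map: B scans all keywords once, takes the minimum matched tier (priority arithmetic instead of branch short-circuiting) and indexes a suggestions table with it.
import Mathlib
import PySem

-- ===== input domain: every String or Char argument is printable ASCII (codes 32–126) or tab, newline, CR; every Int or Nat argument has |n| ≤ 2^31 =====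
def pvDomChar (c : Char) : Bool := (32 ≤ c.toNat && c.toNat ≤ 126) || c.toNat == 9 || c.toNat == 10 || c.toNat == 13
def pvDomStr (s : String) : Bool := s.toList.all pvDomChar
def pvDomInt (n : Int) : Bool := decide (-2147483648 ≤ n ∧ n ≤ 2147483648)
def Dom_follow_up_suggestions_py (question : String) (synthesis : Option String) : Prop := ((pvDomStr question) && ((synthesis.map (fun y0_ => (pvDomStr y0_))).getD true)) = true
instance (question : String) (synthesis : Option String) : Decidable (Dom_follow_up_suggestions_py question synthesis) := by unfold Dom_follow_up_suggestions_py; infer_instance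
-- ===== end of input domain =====

-- B replaces A's first-match if/elif chain by a flat keyword→tier map: it scans all keywords,
-- takes the minimum matched tier and indexes a suggestions table (alternative decomposition, same values).

-- ===== PORT A =====
def follow_up_suggestions_py (question : String) (_synthesis : Option String) : List String :=
  let q_lower := PySem.Str.lower question
  if (["blocker", "critical", "ready"] : List String).any (fun kw => PySem.Str.isIn kw q_lower) then
    ["What RFIs should I send first?",
     "What is the recommended contingency?",
     "Which trades are highest risk?"]
  else if (["structural", "concrete", "rcc", "steel"] : List String).any (fun kw => PySem.Str.isIn kw q_lower) then
    ["What is the estimated structural cost?",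
     "Are there missing structural drawings?",
     "What concrete grades are specified?"]
  else if (["mep", "electrical", "plumbing", "hvac"] : List String).any (fun kw => PySem.Str.isIn kw q_lower) then
    ["How complete is the MEP specification?",
     "Are MEP BOQ items extracted?",
     "What specialist subcontractors are needed?"]
  else if (["cost", "rate", "price", "estimate"] : List String).any (fun kw => PySem.Str.isIn kw q_lower) then
    ["What is the recommended contingency?",
     "Which trades have unrated items?",
     "What is the cost per sqm?"]
  else if (["rfi", "clarification", "question"] : List String).any (fun kw => PySem.Str.isIn kw q_lower) then
    ["What are the critical blockers?",
     "Which gaps have the highest cost impact?",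
     "Summarise the door and window schedule"]
  else
    ["What are the critical blockers?",
     "What is the recommended contingency?",
     "What RFIs should I send first?"]

-- ===== PORT B =====
-- flat keyword → priority-tier association (Source B's _KEYWORD_TIER, insertion order)
def pvKeywordTier : List (String × Nat) :=
  [("blocker", 0), ("critical", 0), ("ready", 0),
   ("structural", 1), ("concrete", 1), ("rcc", 1), ("steel", 1),
   ("mep", 2), ("electrical", 2), ("plumbing", 2), ("hvac", 2),
   ("cost", 3), ("rate", 3), ("price", 3), ("estimate", 3),
   ("rfi", 4), ("clarification", 4), ("question", 4)]

-- Source B's _TIER_SUGGESTIONS, indexed by tier (5 = generic fallback)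
def pvTierSuggestions : Nat → List String
  | 0 => ["What RFIs should I send first?",
          "What is the recommended contingency?",
          "Which trades are highest risk?"]
  | 1 => ["What is the estimated structural cost?",
          "Are there missing structural drawings?",
          "What concrete grades are specified?"]
  | 2 => ["How complete is the MEP specification?",
          "Are MEP BOQ items extracted?",
          "What specialist subcontractors are needed?"]
  | 3 => ["What is the recommended contingency?",
          "Which trades have unrated items?",
          "What is the cost per sqm?"]
  | 4 => ["What are the critical blockers?",
          "Which gaps have the highest cost impact?",
          "Summarise the door and window schedule"]
  | _ => ["What are the critical blockers?",
          "What is the recommended contingency?",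
          "What RFIs should I send first?"]

-- Source B's `min((t for kw, t in _KEYWORD_TIER.items() if kw in q), default=5)`:
-- collect the tiers of the matched keywords, then fold `min` with default 5
def pvMinTier (q : String) : Nat :=
  (pvKeywordTier.filterMap (fun p => if PySem.Str.isIn p.1 q then some p.2 else none)).foldl min 5

def follow_up_suggestions_py_alt (question : String) (_synthesis : Option String) : List String :=
  pvTierSuggestions (pvMinTier (PySem.Str.lower question))

-- ===== PRECONDITION & SPEC =====
def Spec_follow_up_suggestions_py (question : String) (synthesis : Option String) (out : List String) : Prop := out = follow_up_suggestions_py_alt question synthesis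
instance (question : String) (synthesis : Option String) (out : List String) : Decidable (Spec_follow_up_suggestions_py question synthesis out) := by unfold Spec_follow_up_suggestions_py; infer_instance

-- ===== CLAIM (what is proved, stated in full; the proofs are below) =====
def Claim_equal_follow_up_suggestions_py : Prop := ∀ (question : String) (synthesis : Option String), Dom_follow_up_suggestions_py question synthesis → Spec_follow_up_suggestions_py question synthesis (follow_up_suggestions_py question synthesis)

-- ===== LEMMAS AND PROOFS =====

-- the index of the first matching keyword group (A's branch order), used only by the proof
def pvChainIdx (q : String) : Nat :=
  if (["blocker", "critical", "ready"] : List String).any (fun kw => PySem.Str.isIn kw q) then 0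
  else if (["structural", "concrete", "rcc", "steel"] : List String).any (fun kw => PySem.Str.isIn kw q) then 1
  else if (["mep", "electrical", "plumbing", "hvac"] : List String).any (fun kw => PySem.Str.isIn kw q) then 2
  else if (["cost", "rate", "price", "estimate"] : List String).any (fun kw => PySem.Str.isIn kw q) then 3
  else if (["rfi", "clarification", "question"] : List String).any (fun kw => PySem.Str.isIn kw q) then 4
  else 5

-- folding `min` over the matched tiers of one same-tier keyword group
theorem pv_fold_min_group (q : String) (i : Nat) (kws : List String) : ∀ (acc : Nat),
    (((kws.map (fun k => (k, i))).filterMap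
        (fun p => if PySem.Str.isIn p.1 q then some p.2 else none)).foldl min acc)
      = if kws.any (fun kw => PySem.Str.isIn kw q) then min acc i else acc := by
  induction kws with
  | nil => intro acc; simp
  | cons k rest ih =>
      intro acc
      simp only [List.map_cons, List.filterMap_cons, List.any_cons]
      by_cases h : PySem.Str.isIn k q
      · simp only [h, if_pos, List.foldl_cons, ih, Bool.true_or]
        by_cases hr : rest.any (fun kw => PySem.Str.isIn kw q) <;> simp
      · have h2 := ih acc
        simp only [PySem.Str.isIn, List.filterMap_map, Function.comp_def,
          List.any_eq_true] at h2
        simp only [PySem.Str.isIn] at h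
        simpa [h] using h2

-- the flat keyword→tier table is the concatenation of the five same-tier groups
theorem pvKeywordTier_groups :
    pvKeywordTier
      = (["blocker", "critical", "ready"].map (fun k => (k, 0)))
        ++ (["structural", "concrete", "rcc", "steel"].map (fun k => (k, 1)))
        ++ (["mep", "electrical", "plumbing", "hvac"].map (fun k => (k, 2)))
        ++ (["cost", "rate", "price", "estimate"].map (fun k => (k, 3)))
        ++ (["rfi", "clarification", "question"].map (fun k => (k, 4))) := by
  rfl

-- the min of the matched tiers equals the index of the first matching group
theorem pvMinTier_eq_chainIdx (q : String) : pvMinTier q = pvChainIdx q := by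
  unfold pvMinTier pvChainIdx
  rw [pvKeywordTier_groups]
  simp only [List.filterMap_append, List.foldl_append, pv_fold_min_group]
  split_ifs <;> rfl

-- ===== VERDICT (by name: the statement is the Claim_ definition above) =====
theorem follow_up_suggestions_py_spec : Claim_equal_follow_up_suggestions_py := by
  intro question synthesis _
  unfold Spec_follow_up_suggestions_py follow_up_suggestions_py follow_up_suggestions_py_alt
  rw [pvMinTier_eq_chainIdx]
  unfold pvChainIdx
  split_ifs <;> simp_all [pvTierSuggestions]
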